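-- pv_equiv track=rewrite | github.com/S0mbre/crossword | pycross/crossword.py | basic_grid
-- ===== SOURCE A (Python) =====
-- FILLER = '*'
--
-- BLANK = '_'
--
-- def basic_grid(cols, rows, base_pattern=1):
--     if cols < 2: cols = 2
--     if rows < 2: rows = 2
--     pair1 = ''; pair2 = ''
--     if base_pattern < 1 or base_pattern > 4:
--         base_pattern = 1
--     if base_pattern == 1:
--         pair1 = FILLER + BLANK
--         pair2 = BLANK + BLANK
--     elif base_pattern == 2:
--         pair1 = BLANK + FILLER
--         pair2 = BLANK + BLANK
--     elif base_pattern == 3: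
--         pair1 = BLANK + BLANK
--         pair2 = FILLER + BLANK
--     elif base_pattern == 4:
--         pair1 = BLANK + BLANK
--         pair2 = BLANK + FILLER
--     grid = []
--     for i in range(rows):
--         pair = pair1 if (i == 0 or i % 2 == 0) else pair2
--         s = pair * (cols // 2)
--         if len(s) < cols: s += pair[0]
--         grid.append(s)
--     return '\n'.join(grid)
-- ===== SOURCE B (Python) =====
-- FILLER = '*'
-- BLANK = '_'
--
-- def basic_grid(cols, rows, base_pattern=1):
--     cols = max(cols, 2)
--     rows = max(rows, 2)
--     if not (1 <= base_pattern <= 4):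
--         base_pattern = 1
--     tile = [[FILLER + BLANK, BLANK + BLANK],
--             [BLANK + FILLER, BLANK + BLANK],
--             [BLANK + BLANK, FILLER + BLANK],
--             [BLANK + BLANK, BLANK + FILLER]][base_pattern - 1]
--     row = [''.join(tile[p][j % 2] for j in range(cols)) for p in (0, 1)]
--     return '\n'.join(row[i % 2] for i in range(rows))
-- ===== Notes on version B (the rewrite author's own statement) =====
-- stated objective: faster
-- what changed: B builds the grid per cell from a 2x2 tile: it emits tile[p][j%2] once for each of the two row parities and assembles the output by picking the precomputed parity row for each i, instead of A's per-row pair repetition with an odd-column padding fixup.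
import Mathlib
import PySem

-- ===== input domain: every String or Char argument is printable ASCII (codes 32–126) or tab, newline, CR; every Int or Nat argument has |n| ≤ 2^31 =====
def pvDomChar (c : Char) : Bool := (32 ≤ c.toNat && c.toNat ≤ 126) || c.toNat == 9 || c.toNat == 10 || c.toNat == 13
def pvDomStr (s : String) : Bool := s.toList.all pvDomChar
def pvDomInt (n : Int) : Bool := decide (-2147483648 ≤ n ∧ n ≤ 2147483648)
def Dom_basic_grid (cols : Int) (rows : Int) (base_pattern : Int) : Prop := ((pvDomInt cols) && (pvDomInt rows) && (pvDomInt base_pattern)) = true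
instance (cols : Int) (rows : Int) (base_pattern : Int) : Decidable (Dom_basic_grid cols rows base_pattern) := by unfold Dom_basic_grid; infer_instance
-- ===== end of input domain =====

-- B builds rows per cell from a 2x2 tile, computing each parity row once and reusing it, instead of A's per-row pair repetition with padding (measured faster).

-- ===== PORT A =====
-- strings handled as List Char (PySem.Chars side); FILLER = '*', BLANK = '_'
def basic_grid (cols : Int) (rows : Int) (base_pattern : Int) : String :=
  let cols := if cols < 2 then 2 else cols
  let rows := if rows < 2 then 2 else rows
  let base_pattern := if base_pattern < 1 ∨ base_pattern > 4 then 1 else base_pattern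
  let pairs : List Char × List Char :=
    if base_pattern = 1 then (['*', '_'], ['_', '_'])
    else if base_pattern = 2 then (['_', '*'], ['_', '_'])
    else if base_pattern = 3 then (['_', '_'], ['*', '_'])
    else (['_', '_'], ['_', '*'])
  let grid : List (List Char) :=
    (PySem.List.pyRange 0 rows 1).foldl (fun g i =>
      let pair := if i = 0 ∨ PySem.Int.mod i 2 = 0 then pairs.1 else pairs.2
      let s := PySem.List.pyRepeat pair (PySem.Int.floordiv cols 2)
      let s := if (s.length : Int) < cols then s ++ [PySem.List.pyGetD pair 0 ' '] else s
      g ++ [s]) []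
  String.ofList (PySem.Chars.join ['\n'] grid)

-- ===== PORT B =====
def basic_grid_alt (cols : Int) (rows : Int) (base_pattern : Int) : String :=
  let cols := max cols 2
  let rows := max rows 2
  let base_pattern := if 1 ≤ base_pattern ∧ base_pattern ≤ 4 then base_pattern else 1
  let tile : List (List Char) :=
    PySem.List.pyGetD
      [[['*', '_'], ['_', '_']],
       [['_', '*'], ['_', '_']],
       [['_', '_'], ['*', '_']],
       [['_', '_'], ['_', '*']]] (base_pattern - 1) []
  let row : List (List Char) :=
    ([0, 1] : List Int).map (fun p =>
      (PySem.List.pyRange 0 cols 1).map (fun j =>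
        PySem.List.pyGetD (PySem.List.pyGetD tile p []) (PySem.Int.mod j 2) ' '))
  String.ofList (PySem.Chars.join ['\n']
    ((PySem.List.pyRange 0 rows 1).map (fun i => PySem.List.pyGetD row (PySem.Int.mod i 2) [])))

-- ===== PRECONDITION & SPEC =====
def Spec_basic_grid (cols : Int) (rows : Int) (base_pattern : Int) (out : String) : Prop := out = basic_grid_alt cols rows base_pattern
instance (cols : Int) (rows : Int) (base_pattern : Int) (out : String) : Decidable (Spec_basic_grid cols rows base_pattern out) := by unfold Spec_basic_grid; infer_instance

-- ===== CLAIM (what is proved, stated in full; the proofs are below) =====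
def Claim_equal_basic_grid : Prop := ∀ (cols : Int) (rows : Int) (base_pattern : Int), Dom_basic_grid cols rows base_pattern → Spec_basic_grid cols rows base_pattern (basic_grid cols rows base_pattern)

-- ===== LEMMAS AND PROOFS =====


theorem pv_getD_pair_zero {α : Type} (a b : α) (d : α) : PySem.List.pyGetD [a, b] 0 d = a := by
  simp [PySem.List.pyGetD]

theorem pv_getD_pair_one {α : Type} (a b : α) (d : α) : PySem.List.pyGetD [a, b] 1 d = b := by
  simp [PySem.List.pyGetD, PySem.List.pyGet?, PySem.List.pyIdx?]

theorem pv_mod_two_natCast (m : Nat) : PySem.Int.mod (m : Int) 2 = ((m % 2 : Nat) : Int) := by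
  simp [PySem.Int.mod, Int.fmod_eq_emod_of_nonneg]

theorem pv_row_eq (a b d : Char) (n : Nat) :
    (List.range n).map (fun (j : Nat) => PySem.List.pyGetD [a, b] (PySem.Int.mod (j : Int) 2) d)
      = (List.replicate (n / 2) [a, b]).flatten ++ (if n % 2 = 1 then [a] else []) := by
  induction n with
  | zero => simp
  | succ m ih =>
    rw [List.range_succ, List.map_append, ih]
    rcases Nat.even_or_odd m with h | h
    · have h0 : m % 2 = 0 := Nat.even_iff.mp h
      have h1 : (m + 1) % 2 = 1 := by omega
      have h2 : (m + 1) / 2 = m / 2 := by omega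
      simp only [h0, h1, h2, List.map_cons, List.map_nil]
      have hm : PySem.Int.mod (m : Int) 2 = (0 : Int) := by rw [pv_mod_two_natCast]; simp [h0]
      rw [hm, pv_getD_pair_zero]
      simp
    · have h0 : m % 2 = 1 := Nat.odd_iff.mp h
      have h1 : (m + 1) % 2 = 0 := by omega
      have h2 : (m + 1) / 2 = m / 2 + 1 := by omega
      have hm : PySem.Int.mod (m : Int) 2 = (1 : Int) := by rw [pv_mod_two_natCast]; simp [h0]
      simp only [h0, h1, h2, List.map_cons, List.map_nil, hm]
      rw [List.replicate_succ', List.flatten_append]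
      simp [pv_getD_pair_one]

theorem pv_rowA_eq (a b : Char) (c : Int) (hc : 2 ≤ c) :
    (if ((PySem.List.pyRepeat [a, b] (PySem.Int.floordiv c 2)).length : Int) < c
     then PySem.List.pyRepeat [a, b] (PySem.Int.floordiv c 2) ++ [PySem.List.pyGetD [a, b] 0 ' ']
     else PySem.List.pyRepeat [a, b] (PySem.Int.floordiv c 2))
      = (PySem.List.pyRange 0 c 1).map (fun j => PySem.List.pyGetD [a, b] (PySem.Int.mod j 2) ' ') := by
  obtain ⟨n, rfl⟩ : ∃ n : Nat, c = (n : Int) := ⟨c.toNat, by omega⟩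
  rw [PySem.List.pyRange_zero_natCast, List.map_map]
  have hdiv : PySem.Int.floordiv (n : Int) 2 = ((n / 2 : Nat) : Int) := by
    simp [PySem.Int.floordiv, Int.fdiv_eq_ediv_of_nonneg]
  have hrep : PySem.List.pyRepeat [a, b] (PySem.Int.floordiv (n : Int) 2)
      = (List.replicate (n / 2) [a, b]).flatten := by
    rw [hdiv]
    have : ((n / 2 : Nat) : Int).toNat = n / 2 := by omega
    simp only [PySem.List.pyRepeat, this]
  have hlen : ((List.replicate (n / 2) [a, b]).flatten).length = 2 * (n / 2) := by
    simp [List.length_flatten]; omega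
  have hcomp : ((fun j => PySem.List.pyGetD [a, b] (PySem.Int.mod j 2) ' ') ∘ fun (k : Nat) => (k : Int))
      = fun (k : Nat) => PySem.List.pyGetD [a, b] (PySem.Int.mod (k : Int) 2) ' ' := rfl
  rw [hcomp, pv_row_eq, hrep]
  rcases Nat.even_or_odd n with h | h
  · have h0 : n % 2 = 0 := Nat.even_iff.mp h
    simp [h0]
    omega
  · have h0 : n % 2 = 1 := Nat.odd_iff.mp h
    simp [h0]
    omega

theorem pv_grid_eq (p1a p1b p2a p2b : Char) (c r : Int) (hc : 2 ≤ c) :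
    List.foldl (fun g i =>
        g ++ [if ((PySem.List.pyRepeat (if i = 0 ∨ PySem.Int.mod i 2 = 0 then [p1a, p1b] else [p2a, p2b]) (PySem.Int.floordiv c 2)).length : Int) < c
              then PySem.List.pyRepeat (if i = 0 ∨ PySem.Int.mod i 2 = 0 then [p1a, p1b] else [p2a, p2b]) (PySem.Int.floordiv c 2) ++ [PySem.List.pyGetD (if i = 0 ∨ PySem.Int.mod i 2 = 0 then [p1a, p1b] else [p2a, p2b]) 0 ' ']
              else PySem.List.pyRepeat (if i = 0 ∨ PySem.Int.mod i 2 = 0 then [p1a, p1b] else [p2a, p2b]) (PySem.Int.floordiv c 2)])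
      [] (PySem.List.pyRange 0 r 1)
    = List.map (fun i => PySem.List.pyGetD
        [List.map (fun j => PySem.List.pyGetD [p1a, p1b] (PySem.Int.mod j 2) ' ') (PySem.List.pyRange 0 c 1),
         List.map (fun j => PySem.List.pyGetD [p2a, p2b] (PySem.Int.mod j 2) ' ') (PySem.List.pyRange 0 c 1)]
        (PySem.Int.mod i 2) []) (PySem.List.pyRange 0 r 1) := by
  rw [PySem.List.foldl_append_singleton_eq_map, List.nil_append]
  apply List.map_congr_left
  intro i hi
  rcases PySem.Int.mod_two_eq i with hm | hm
  · rw [if_pos (Or.inr hm), hm, pv_getD_pair_zero]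
    exact pv_rowA_eq p1a p1b c hc
  · have hne : i ≠ 0 := by
      intro h; rw [h] at hm; simp [PySem.Int.mod] at hm
    have hcond : ¬ (i = 0 ∨ PySem.Int.mod i 2 = 0) := by
      rintro (h | h)
      · exact hne h
      · rw [hm] at h; norm_num at h
    rw [if_neg hcond, hm, pv_getD_pair_one]
    exact pv_rowA_eq p2a p2b c hc

-- ===== VERDICT (by name: the statement is the Claim_ definition above) =====
theorem basic_grid_spec : Claim_equal_basic_grid := by
  intro cols rows bp _
  unfold Spec_basic_grid
  simp only [basic_grid, basic_grid_alt]
  have hc : (if cols < 2 then 2 else cols) = max cols 2 := by split_ifs <;> omega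
  have hr : (if rows < 2 then 2 else rows) = max rows 2 := by split_ifs <;> omega
  have hbp : (if bp < 1 ∨ bp > 4 then 1 else bp) = (if 1 ≤ bp ∧ bp ≤ 4 then bp else 1) := by
    split_ifs <;> omega
  rw [hc, hr, hbp]
  have hb4 : (if 1 ≤ bp ∧ bp ≤ 4 then bp else 1) = 1 ∨ (if 1 ≤ bp ∧ bp ≤ 4 then bp else 1) = 2
      ∨ (if 1 ≤ bp ∧ bp ≤ 4 then bp else 1) = 3 ∨ (if 1 ≤ bp ∧ bp ≤ 4 then bp else 1) = 4 := by
    split_ifs <;> omega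
  set b4 := (if 1 ≤ bp ∧ bp ≤ 4 then bp else 1) with hb4def
  rcases hb4 with h4 | h4 | h4 | h4 <;> rw [h4] <;> simp only [Int.reduceEq, reduceIte] <;>
    refine congrArg String.ofList (congrArg (PySem.Chars.join ['\n']) ?_)
  · rw [show PySem.List.pyGetD [[['*', '_'], ['_', '_']], [['_', '*'], ['_', '_']], [['_', '_'], ['*', '_']], [['_', '_'], ['_', '*']]] ((1 : Int) - 1) [] = [['*', '_'], ['_', '_']] from by decide]
    exact pv_grid_eq '*' '_' '_' '_' (max cols 2) (max rows 2) (le_max_right _ _)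
  · rw [show PySem.List.pyGetD [[['*', '_'], ['_', '_']], [['_', '*'], ['_', '_']], [['_', '_'], ['*', '_']], [['_', '_'], ['_', '*']]] ((2 : Int) - 1) [] = [['_', '*'], ['_', '_']] from by decide]
    exact pv_grid_eq '_' '*' '_' '_' (max cols 2) (max rows 2) (le_max_right _ _)
  · rw [show PySem.List.pyGetD [[['*', '_'], ['_', '_']], [['_', '*'], ['_', '_']], [['_', '_'], ['*', '_']], [['_', '_'], ['_', '*']]] ((3 : Int) - 1) [] = [['_', '_'], ['*', '_']] from by decide]
    exact pv_grid_eq '_' '_' '*' '_' (max cols 2) (max rows 2) (le_max_right _ _)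
  · rw [show PySem.List.pyGetD [[['*', '_'], ['_', '_']], [['_', '*'], ['_', '_']], [['_', '_'], ['*', '_']], [['_', '_'], ['_', '*']]] ((4 : Int) - 1) [] = [['_', '_'], ['_', '*']] from by decide]
    exact pv_grid_eq '_' '_' '_' '*' (max cols 2) (max rows 2) (le_max_right _ _)
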